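-- pv_equiv track=rewrite | github.com/hdPotato34/ukumog-engine | ukumog_engine/incremental.py | _opponent_wins_after_move_maps
-- ===== SOURCE A (Python) =====
-- def _opponent_wins_after_move_maps(
--
--     moves: list[int] | tuple[int, ...],
--     opponent_winning_moves: tuple[int, ...],
-- ) -> tuple[dict[int, tuple[int, ...]], dict[int, int]]:
--     total = len(opponent_winning_moves)
--     if total == 0:
--         empty_map = {move: () for move in moves}
--         return empty_map, {move: 0 for move in moves}
--
--     opponent_winning_set = set(opponent_winning_moves)
--     if total == 1:
--         only_move = opponent_winning_moves[0]
--         after_map = {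
--             move: (() if move == only_move else opponent_winning_moves)
--             for move in moves
--         }
--         count_map = {move: 0 if move == only_move else 1 for move in moves}
--         return after_map, count_map
--
--     blocked_templates = {
--         winning_move: tuple(move for move in opponent_winning_moves if move != winning_move)
--         for winning_move in opponent_winning_moves
--     }
--     after_map = {
--         move: (
--             blocked_templates[move]
--             if move in opponent_winning_set
--             else opponent_winning_moves
--         )
--         for move in moves
--     }
--     count_map = {
--         move: total - 1 if move in opponent_winning_set else total
--         for move in moves
--     }
--     return after_map, count_map
-- ===== SOURCE B (Python) =====
-- def _opponent_wins_after_move_maps(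
--     moves,
--     opponent_winning_moves,
-- ):
--     total = len(opponent_winning_moves)
--     # inverted index: winning move -> list of its positions in opponent_winning_moves
--     positions = {}
--     for i, w in enumerate(opponent_winning_moves):
--         positions.setdefault(w, []).append(i)
--     after_map = {}
--     count_map = {}
--     for move in moves:
--         pos = positions.get(move)
--         if pos is None:
--             after_map[move] = tuple(opponent_winning_moves)
--             count_map[move] = total
--         else:
--             # stitch the slices between consecutive occurrences of `move`
--             pieces = []
--             prev = 0
--             for i in pos:
--                 pieces.extend(opponent_winning_moves[prev:i])
--                 prev = i + 1
--             pieces.extend(opponent_winning_moves[prev:])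
--             after_map[move] = tuple(pieces)
--             count_map[move] = total - 1
--     return after_map, count_map
-- ===== Notes on version B (the rewrite author's own statement) =====
-- stated objective: alternative
-- what changed: B builds an inverted position index (winning move -> list of its indices) in one enumerate pass and produces each blocked template by stitching the slices between consecutive occurrences, instead of A's per-winning-move filter comprehensions and its three total-length special cases.
import Mathlib
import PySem

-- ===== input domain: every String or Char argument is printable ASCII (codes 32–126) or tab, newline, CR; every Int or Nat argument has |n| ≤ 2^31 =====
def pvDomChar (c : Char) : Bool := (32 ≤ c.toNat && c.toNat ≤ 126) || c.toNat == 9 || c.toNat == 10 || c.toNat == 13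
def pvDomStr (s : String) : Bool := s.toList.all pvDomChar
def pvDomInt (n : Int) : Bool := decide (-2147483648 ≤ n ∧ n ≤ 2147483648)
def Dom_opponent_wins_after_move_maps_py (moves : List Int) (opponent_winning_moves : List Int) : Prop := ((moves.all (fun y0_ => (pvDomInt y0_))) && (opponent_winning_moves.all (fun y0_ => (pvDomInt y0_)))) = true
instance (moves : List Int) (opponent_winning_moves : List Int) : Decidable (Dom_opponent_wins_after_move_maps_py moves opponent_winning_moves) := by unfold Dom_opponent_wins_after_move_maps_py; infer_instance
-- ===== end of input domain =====

-- B replaces A's per-winning-move filter comprehensions (and its total 0/1 special cases) by an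
-- inverted position index plus slice stitching (objective: alternative).


-- ===== PORT A =====
def opponent_wins_after_move_maps_py (moves : List Int) (opponent_winning_moves : List Int) : (List (Int × List Int)) × (List (Int × Int)) :=
  let total : Int := opponent_winning_moves.length
  if total = 0 then
    let empty_map : PySem.Dict Int (List Int) :=
      moves.foldl (fun d move => d.insert move []) PySem.Dict.empty
    let zero_map : PySem.Dict Int Int :=
      moves.foldl (fun d move => d.insert move 0) PySem.Dict.empty
    (empty_map.items, zero_map.items)
  else
    let opponent_winning_set : PySem.Set Int := PySem.Set.ofList opponent_winning_moves
    if total = 1 then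
      -- opponent_winning_moves[0]: in this branch the list is nonempty, so pyGetD is exact
      let only_move : Int := PySem.List.pyGetD opponent_winning_moves 0 0
      let after_map : PySem.Dict Int (List Int) :=
        moves.foldl (fun d move =>
          d.insert move (if move = only_move then [] else opponent_winning_moves)) PySem.Dict.empty
      let count_map : PySem.Dict Int Int :=
        moves.foldl (fun d move =>
          d.insert move (if move = only_move then 0 else 1)) PySem.Dict.empty
      (after_map.items, count_map.items)
    else
      let blocked_templates : PySem.Dict Int (List Int) :=
        opponent_winning_moves.foldl (fun d winning_move =>
          d.insert winning_move (opponent_winning_moves.filter (fun move => decide (move ≠ winning_move))))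
          PySem.Dict.empty
      let after_map : PySem.Dict Int (List Int) :=
        moves.foldl (fun d move =>
          d.insert move (if opponent_winning_set.contains move then
              -- blocked_templates[move]: the key is present whenever the branch is taken, so getD is exact
              blocked_templates.getD move []
            else opponent_winning_moves)) PySem.Dict.empty
      let count_map : PySem.Dict Int Int :=
        moves.foldl (fun d move =>
          d.insert move (if opponent_winning_set.contains move then total - 1 else total)) PySem.Dict.empty
      (after_map.items, count_map.items)

-- ===== PORT B =====
def opponent_wins_after_move_maps_py_alt (moves : List Int) (opponent_winning_moves : List Int) : (List (Int × List Int)) × (List (Int × Int)) :=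
  let total : Int := opponent_winning_moves.length
  -- positions.setdefault(w, []).append(i)  =  modify w [] (· ++ [i])
  let positions : PySem.Dict Int (List Int) :=
    (PySem.List.enumerate opponent_winning_moves 0).foldl
      (fun d p => d.modify p.2 [] (fun l => l ++ [p.1])) PySem.Dict.empty
  let st :=
    moves.foldl
      (fun (s : PySem.Dict Int (List Int) × PySem.Dict Int Int) move =>
        match positions.get? move with
        | none => (s.1.insert move opponent_winning_moves, s.2.insert move total)
        | some pos =>
          let t := pos.foldl
            (fun (q : List Int × Int) i =>
              (q.1 ++ PySem.List.slice opponent_winning_moves (some q.2) (some i), i + 1))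
            ([], 0)
          (s.1.insert move (t.1 ++ PySem.List.slice opponent_winning_moves (some t.2) none),
           s.2.insert move (total - 1)))
      (PySem.Dict.empty, PySem.Dict.empty)
  (st.1.items, st.2.items)

-- ===== PRECONDITION & SPEC =====
def Spec_opponent_wins_after_move_maps_py (moves : List Int) (opponent_winning_moves : List Int) (out : (List (Int × List Int)) × (List (Int × Int))) : Prop := out = opponent_wins_after_move_maps_py_alt moves opponent_winning_moves
instance (moves : List Int) (opponent_winning_moves : List Int) (out : (List (Int × List Int)) × (List (Int × Int))) : Decidable (Spec_opponent_wins_after_move_maps_py moves opponent_winning_moves out) := by unfold Spec_opponent_wins_after_move_maps_py; infer_instance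

-- ===== CLAIM (what is proved, stated in full; the proofs are below) =====
def Claim_equal_opponent_wins_after_move_maps_py : Prop := ∀ (moves : List Int) (opponent_winning_moves : List Int), Dom_opponent_wins_after_move_maps_py moves opponent_winning_moves → Spec_opponent_wins_after_move_maps_py moves opponent_winning_moves (opponent_wins_after_move_maps_py moves opponent_winning_moves)

-- ===== LEMMAS AND PROOFS =====

-- the per-move value both programs effectively insert into after_map / count_map
def pvAfterVal (owm : List Int) (move : Int) : List Int :=
  if move ∈ owm then owm.filter (fun m => decide (m ≠ move)) else owm

def pvCountVal (owm : List Int) (move : Int) : Int :=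
  if move ∈ owm then (owm.length : Int) - 1 else (owm.length : Int)

lemma contains_ofList (xs : List Int) (mv : Int) :
    (PySem.Set.ofList xs).contains mv = decide (mv ∈ xs) := by
  have := PySem.Set.mem_ofList xs mv
  unfold PySem.Set.contains
  simp at *

-- a dict built over l by inserting a value depending only on the key looks up as that value
lemma getD_foldl_insert_fn (l : List Int) (g : Int → List Int) (d : PySem.Dict Int (List Int)) (k : Int) :
    (l.foldl (fun d x => d.insert x (g x)) d).getD k [] =
      if k ∈ l then g k else d.getD k [] := by
  induction l generalizing d with
  | nil => simp
  | cons x l ih =>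
    simp only [List.foldl_cons, ih, PySem.Dict.getD_insert, List.mem_cons]
    by_cases hl : k ∈ l
    · simp [hl]
    · by_cases hx : k = x <;> simp [hl, hx]

lemma a_eq (moves owm : List Int) :
    opponent_wins_after_move_maps_py moves owm =
      ((moves.foldl (fun d move => d.insert move (pvAfterVal owm move)) PySem.Dict.empty).items,
       (moves.foldl (fun d move => d.insert move (pvCountVal owm move)) PySem.Dict.empty).items) := by
  unfold opponent_wins_after_move_maps_py
  rcases owm with _ | ⟨a, owm'⟩
  · simp [pvAfterVal, pvCountVal]
  · rcases owm' with _ | ⟨b, owm''⟩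
    · -- total = 1
      simp only [List.length_cons, List.length_nil]
      norm_num
      refine ⟨?_, ?_⟩
      · congr 1
        apply PySem.List.foldl_congr_mem
        intro d mv _
        congr 1
        simp only [pvAfterVal]
        by_cases h : mv = a <;> simp [h, List.filter]
      · congr 1
        apply PySem.List.foldl_congr_mem
        intro d mv _
        congr 1
        simp only [pvCountVal]
        by_cases h : mv = a <;> simp [h]
    · -- total ≥ 2
      simp only [List.length_cons]
      rw [if_neg (by omega), if_neg (by omega)]
      simp only [Prod.mk.injEq]
      refine ⟨?_, ?_⟩
      · congr 1
        apply PySem.List.foldl_congr_mem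
        intro d mv _
        congr 1
        rw [getD_foldl_insert_fn]
        simp only [pvAfterVal, contains_ofList, PySem.Dict.getD_empty]
        by_cases h : mv ∈ a :: b :: owm'' <;> simp [h]
      · congr 1
        apply PySem.List.foldl_congr_mem
        intro d mv _
        congr 1
        simp only [pvCountVal, contains_ofList]
        by_cases h : mv ∈ a :: b :: owm'' <;> simp [h]

-- the inverted index holds exactly the indices of each key, in order
lemma positions_getD (owm : List Int) (w : Int) :
    ((PySem.List.enumerate owm 0).foldl
        (fun d p => d.modify p.2 [] (fun l => l ++ [p.1])) PySem.Dict.empty).getD w [] =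
      ((PySem.List.enumerate owm 0).filter (fun p => p.2 == w)).map (·.1) := by
  have h : (PySem.List.enumerate owm 0).foldl
        (fun d p => d.modify p.2 [] (fun l => l ++ [p.1])) PySem.Dict.empty =
      ((PySem.List.enumerate owm 0).map (fun p => (p.2, p.1))).foldl
        (fun d p => d.modify p.1 [] (fun l => l ++ [p.2])) PySem.Dict.empty := by
    rw [List.foldl_map]
  rw [h, PySem.Dict.getD_foldl_modify_append]
  simp [List.filter_map, List.map_map, Function.comp_def]

-- slice stitching over the occurrence indices of w beyond j reproduces the filter of the suffix
lemma stitch_aux (owm : List Int) (w : Int) :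
    ∀ (tail : List Int) (j p : Nat) (acc : List Int),
      owm.drop j = tail → p ≤ j → (∀ m ∈ (owm.drop p).take (j - p), m ≠ w) →
      ((((PySem.List.enumerate tail (j:Int)).filter (fun q => q.2 == w)).map (·.1)).foldl
          (fun (q : List Int × Int) i => (q.1 ++ PySem.List.slice owm (some q.2) (some i), i + 1)) (acc, (p:Int))).1 ++
        PySem.List.slice owm
          (some ((((PySem.List.enumerate tail (j:Int)).filter (fun q => q.2 == w)).map (·.1)).foldl
            (fun (q : List Int × Int) i => (q.1 ++ PySem.List.slice owm (some q.2) (some i), i + 1)) (acc, (p:Int))).2) none =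
      acc ++ (owm.drop p).filter (fun m => decide (m ≠ w)) := by
  intro tail
  induction tail with
  | nil =>
    intro j p acc hdrop hpj hnoW
    have hsplit : owm.drop p = (owm.drop p).take (j - p) ++ owm.drop j := by
      conv_lhs => rw [← List.take_append_drop (j - p) (owm.drop p)]
      rw [List.drop_drop]
      congr 2
      omega
    have hfilt : ((owm.drop p).take (j - p)).filter (fun m => decide (m ≠ w)) =
        (owm.drop p).take (j - p) :=
      List.filter_eq_self.2 (by intro m hm; simpa using hnoW m hm)
    simp only [PySem.List.enumerate_nil, List.filter_nil, List.map_nil, List.foldl_nil]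
    rw [PySem.List.slice_from_natCast]
    rw [hsplit, hdrop]
    simp only [List.append_nil]
    rw [hfilt]
  | cons x tail ih =>
    intro j p acc hdrop hpj hnoW
    have hjlt : j < owm.length := by
      by_contra h
      rw [List.drop_eq_nil_of_le (by omega)] at hdrop
      exact List.cons_ne_nil x tail hdrop.symm
    have hdrop1 : owm.drop (j + 1) = tail := by
      have h1 := congrArg (List.drop 1) hdrop
      simpa [List.drop_drop, Nat.add_comm] using h1
    have hnoWlen : ((owm.drop p).take (j - p)).length = j - p := by
      rw [List.length_take, List.length_drop]; omega
    have hsplit : owm.drop p = (owm.drop p).take (j - p) ++ (x :: tail) := by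
      conv_lhs => rw [← List.take_append_drop (j - p) (owm.drop p)]
      rw [List.drop_drop, show p + (j - p) = j from by omega, hdrop]
    have hfilt : ((owm.drop p).take (j - p)).filter (fun m => decide (m ≠ w)) =
        (owm.drop p).take (j - p) :=
      List.filter_eq_self.2 (by intro m hm; simpa using hnoW m hm)
    have hcast : (j : Int) + 1 = ((j + 1 : Nat) : Int) := by push_cast; ring
    rw [PySem.List.enumerate_cons]
    by_cases hx : x = w
    · have hbeq : (x == w) = true := by simp [hx]
      simp only [List.filter_cons, hbeq, if_true, List.map_cons, List.foldl_cons]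
      rw [PySem.List.slice_natCast, hcast]
      rw [ih (j + 1) (j + 1) (acc ++ (owm.drop p).take (j - p)) hdrop1 le_rfl (by simp)]
      conv_rhs => rw [hsplit]
      rw [List.filter_append, hfilt, List.filter_cons]
      have : (decide (x ≠ w)) = false := by simp [hx]
      rw [this]
      simp [hdrop1, List.append_assoc]
    · have hbeq : (x == w) = false := by simp [hx]
      simp only [List.filter_cons, hbeq, Bool.false_eq_true, if_false]
      rw [hcast]
      refine ih (j + 1) p acc hdrop1 (by omega) ?_
      intro m hm
      have htake : (owm.drop p).take (j + 1 - p) = (owm.drop p).take (j - p) ++ [x] := by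
        conv_lhs => rw [hsplit]
        rw [show j + 1 - p = j - p + 1 from by omega, ← hnoWlen]
        simp [List.take_append]
      rw [htake] at hm
      rcases List.mem_append.1 hm with h | h
      · exact hnoW m h
      · simp at h; subst h; exact hx

lemma stitch_eq_filter (owm : List Int) (w : Int) :
    ((((PySem.List.enumerate owm 0).filter (fun p => p.2 == w)).map (·.1)).foldl
        (fun (q : List Int × Int) i => (q.1 ++ PySem.List.slice owm (some q.2) (some i), i + 1)) ([], 0)).1 ++
      PySem.List.slice owm
        (some ((((PySem.List.enumerate owm 0).filter (fun p => p.2 == w)).map (·.1)).foldl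
          (fun (q : List Int × Int) i => (q.1 ++ PySem.List.slice owm (some q.2) (some i), i + 1)) ([], 0)).2) none =
    owm.filter (fun m => decide (m ≠ w)) := by
  have h := stitch_aux owm w owm 0 0 [] (by simp) le_rfl (by simp)
  simpa using h

lemma positions_get?_none_iff (owm : List Int) (w : Int) :
    (((PySem.List.enumerate owm 0).foldl
        (fun d p => d.modify p.2 [] (fun l => l ++ [p.1])) PySem.Dict.empty).get? w = none) ↔ w ∉ owm := by
  rw [PySem.Dict.get?_eq_none_iff_not_mem_keys]
  rw [PySem.Dict.keys_foldl_modify_key]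
  simp [pysem]

-- the main loop of B, split into the two canonical insert folds
lemma alt_fold (owm : List Int) (moves : List Int) :
    ∀ (s : PySem.Dict Int (List Int) × PySem.Dict Int Int),
    moves.foldl
      (fun (s : PySem.Dict Int (List Int) × PySem.Dict Int Int) move =>
        match ((PySem.List.enumerate owm 0).foldl
            (fun d p => d.modify p.2 [] (fun l => l ++ [p.1])) PySem.Dict.empty).get? move with
        | none => (s.1.insert move owm, s.2.insert move (owm.length : Int))
        | some pos =>
          let t := pos.foldl
            (fun (q : List Int × Int) i =>
              (q.1 ++ PySem.List.slice owm (some q.2) (some i), i + 1))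
            ([], 0)
          (s.1.insert move (t.1 ++ PySem.List.slice owm (some t.2) none),
           s.2.insert move ((owm.length : Int) - 1))) s =
    (moves.foldl (fun d move => d.insert move (pvAfterVal owm move)) s.1,
     moves.foldl (fun d move => d.insert move (pvCountVal owm move)) s.2) := by
  induction moves with
  | nil => intro s; rfl
  | cons mv moves ih =>
    intro s
    simp only [List.foldl_cons]
    rcases h : ((PySem.List.enumerate owm 0).foldl
        (fun d p => d.modify p.2 [] (fun l => l ++ [p.1])) PySem.Dict.empty).get? mv with _ | pos
    · have hnm : mv ∉ owm := (positions_get?_none_iff owm mv).1 h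
      rw [ih]
      simp [h, pvAfterVal, pvCountVal, hnm]
    · have hm : mv ∈ owm := by
        by_contra hc
        rw [(positions_get?_none_iff owm mv).2 hc] at h
        simp at h
      have hpos : pos = ((PySem.List.enumerate owm 0).filter (fun p => p.2 == mv)).map (·.1) := by
        have h1 : (((PySem.List.enumerate owm 0).foldl
            (fun d p => d.modify p.2 [] (fun l => l ++ [p.1])) PySem.Dict.empty)).getD mv [] = pos :=
          PySem.Dict.getD_of_get?_eq_some _ _ h
        rw [← h1, positions_getD]
      rw [ih]
      have hst := stitch_eq_filter owm mv
      simp only [hpos] at *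
      simp [h, hst, pvAfterVal, pvCountVal, hm]

lemma alt_eq (moves owm : List Int) :
    opponent_wins_after_move_maps_py_alt moves owm =
      ((moves.foldl (fun d move => d.insert move (pvAfterVal owm move)) PySem.Dict.empty).items,
       (moves.foldl (fun d move => d.insert move (pvCountVal owm move)) PySem.Dict.empty).items) := by
  simp only [opponent_wins_after_move_maps_py_alt]
  rw [alt_fold owm moves (PySem.Dict.empty, PySem.Dict.empty)]

-- ===== VERDICT (by name: the statement is the Claim_ definition above) =====
theorem opponent_wins_after_move_maps_py_spec : Claim_equal_opponent_wins_after_move_maps_py := by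
  intro moves owm _
  unfold Spec_opponent_wins_after_move_maps_py
  rw [a_eq, alt_eq]
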